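-- pv_equiv track=rewrite | github.com/ImageAnalytics/ia-dataset | ia_dataset/utils.py | find_continuous_sequences
-- ===== SOURCE A (Python) =====
-- def find_continuous_sequences(arr, val):
--     sequences = []
--     current_sequence = []
--
--     for idx, value in enumerate(arr):
--         if value == val:
--             current_sequence.append(idx)
--         elif current_sequence:
--             sequences.append(current_sequence)
--             current_sequence = []
--
--     if len(current_sequence) > 0:
--         sequences.append(current_sequence)
--
--     return sequences
-- ===== SOURCE B (Python) =====
-- def find_continuous_sequences(arr, val):
--     idxs = [i for i, v in enumerate(arr) if v == val]
--     runs = []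
--     cur = []
--     for i in idxs:
--         if cur and i == cur[-1] + 1:
--             cur.append(i)
--         else:
--             if cur:
--                 runs.append(cur)
--             cur = [i]
--     if cur:
--         runs.append(cur)
--     return runs
-- ===== Notes on version B (the rewrite author's own statement) =====
-- stated objective: alternative
-- what changed: B first filters out the list of all indices whose element equals val, then segments that index list into runs by gap detection (a new run whenever an index is not previous+1), instead of A's single state machine over the array that flushes on every non-matching element.
import Mathlib
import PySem

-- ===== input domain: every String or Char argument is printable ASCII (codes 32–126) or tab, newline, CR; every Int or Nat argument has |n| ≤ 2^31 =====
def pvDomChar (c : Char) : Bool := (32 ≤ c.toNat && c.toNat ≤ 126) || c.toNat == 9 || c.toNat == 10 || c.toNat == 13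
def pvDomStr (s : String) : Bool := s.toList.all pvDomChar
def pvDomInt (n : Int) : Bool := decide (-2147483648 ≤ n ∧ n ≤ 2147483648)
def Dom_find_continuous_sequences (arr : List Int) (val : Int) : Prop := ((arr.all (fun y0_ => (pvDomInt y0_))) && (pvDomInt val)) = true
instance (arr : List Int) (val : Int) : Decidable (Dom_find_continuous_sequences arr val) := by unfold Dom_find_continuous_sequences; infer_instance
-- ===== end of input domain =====

-- B replaces A's flush-on-mismatch state machine by filtering the matching indices
-- first and then segmenting that index list into runs by gap detection (objective:
-- alternative decomposition, same O(n) cost).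

-- ===== PORT A =====
-- A's loop over enumerate(arr): state (sequences, current_sequence), index counter k.
def fcsLoopA (val : Int) : List Int → Int → List (List Int) × List Int → List (List Int) × List Int
  | [], _, st => st
  | v :: rest, k, (seqs, cur) =>
    if v = val then
      fcsLoopA val rest (k + 1) (seqs, cur ++ [k])
    else if cur ≠ [] then
      fcsLoopA val rest (k + 1) (seqs ++ [cur], [])
    else
      fcsLoopA val rest (k + 1) (seqs, cur)

def find_continuous_sequences (arr : List Int) (val : Int) : List (List Int) :=
  let st := fcsLoopA val arr 0 ([], [])
  if st.2.length > 0 then st.1 ++ [st.2] else st.1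

-- ===== PORT B =====
-- [i for i, v in enumerate(arr) if v == val]
def fcsIdxs (val : Int) : List Int → Int → List Int
  | [], _ => []
  | v :: rest, k => if v = val then k :: fcsIdxs val rest (k + 1) else fcsIdxs val rest (k + 1)

-- second pass: segment the index list into runs by gap detection
def fcsLoopB : List Int → List (List Int) × List Int → List (List Int) × List Int
  | [], st => st
  | i :: rest, (runs, cur) =>
    match cur.getLast? with
    | some p =>
      if i = p + 1 then fcsLoopB rest (runs, cur ++ [i])
      else fcsLoopB rest (runs ++ [cur], [i])
    | none => fcsLoopB rest (runs, [i])

def find_continuous_sequences_alt (arr : List Int) (val : Int) : List (List Int) :=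
  let st := fcsLoopB (fcsIdxs val arr 0) ([], [])
  if st.2 ≠ [] then st.1 ++ [st.2] else st.1

-- ===== PRECONDITION & SPEC =====
def Spec_find_continuous_sequences (arr : List Int) (val : Int) (out : List (List Int)) : Prop := out = find_continuous_sequences_alt arr val
instance (arr : List Int) (val : Int) (out : List (List Int)) : Decidable (Spec_find_continuous_sequences arr val out) := by unfold Spec_find_continuous_sequences; infer_instance

-- ===== CLAIM (what is proved, stated in full; the proofs are below) =====
def Claim_equal_find_continuous_sequences : Prop := ∀ (arr : List Int) (val : Int), Dom_find_continuous_sequences arr val → Spec_find_continuous_sequences arr val (find_continuous_sequences arr val)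

-- ===== LEMMAS AND PROOFS =====

-- final flush, shared shape of both ports' last step
def fcsFinish (st : List (List Int) × List Int) : List (List Int) :=
  if st.2 ≠ [] then st.1 ++ [st.2] else st.1

theorem fcsIdxs_ge (val : Int) : ∀ (arr : List Int) (k i : Int), i ∈ fcsIdxs val arr k → k ≤ i := by
  intro arr
  induction arr with
  | nil => intro k i h; simp [fcsIdxs] at h
  | cons v rest ih =>
    intro k i h
    simp only [fcsIdxs] at h
    split at h
    · rcases List.mem_cons.mp h with rfl | h
      · omega
      · have := ih (k + 1) i h; omega
    · have := ih (k + 1) i h; omega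

-- if every upcoming index jumps past cur's last element, flushing cur now or at the
-- next B-step gives the same final result
theorem fcsLoopB_flush (L : List Int) (runs : List (List Int)) (cur : List Int) (p : Int)
    (hlast : cur.getLast? = some p) (hgap : ∀ i ∈ L, p + 1 < i) :
    fcsFinish (fcsLoopB L (runs, cur)) = fcsFinish (fcsLoopB L (runs ++ [cur], [])) := by
  cases L with
  | nil =>
    have hcur : cur ≠ [] := by intro h; simp [h] at hlast
    simp [fcsLoopB, fcsFinish, hcur]
  | cons i rest =>
    have hi : p + 1 < i := hgap i (List.mem_cons_self)
    simp only [fcsLoopB, hlast]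
    rw [if_neg (by omega)]
    rfl

-- main invariant: with cur empty or ending exactly at k-1, A's loop from index k and
-- B's grouping of the remaining matching indices produce the same finished result
theorem fcsMain (val : Int) : ∀ (arr : List Int) (k : Int) (seqs : List (List Int)) (cur : List Int),
    (cur = [] ∨ cur.getLast? = some (k - 1)) →
    fcsFinish (fcsLoopA val arr k (seqs, cur)) = fcsFinish (fcsLoopB (fcsIdxs val arr k) (seqs, cur)) := by
  intro arr
  induction arr with
  | nil => intro k seqs cur _; simp [fcsLoopA, fcsIdxs, fcsLoopB]
  | cons v rest ih =>
    intro k seqs cur hinv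
    by_cases hv : v = val
    · simp only [fcsLoopA, fcsIdxs, if_pos hv, fcsLoopB]
      rcases hinv with rfl | hlast
      · simp only [List.getLast?_nil, List.nil_append]
        exact ih (k + 1) seqs [k] (Or.inr (by simp))
      · simp only [hlast]
        rw [if_pos (by omega)]
        exact ih (k + 1) seqs (cur ++ [k]) (Or.inr (by simp))
    · simp only [fcsLoopA, fcsIdxs, if_neg hv]
      rcases hinv with rfl | hlast
      · simp only [ne_eq, not_true_eq_false, if_false]
        exact ih (k + 1) seqs [] (Or.inl rfl)
      · have hcur : cur ≠ [] := by intro h; simp [h] at hlast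
        rw [if_pos hcur]
        rw [ih (k + 1) (seqs ++ [cur]) [] (Or.inl rfl)]
        rw [fcsLoopB_flush (fcsIdxs val rest (k + 1)) seqs cur (k - 1) hlast]
        intro i hi
        have := fcsIdxs_ge val rest (k + 1) i hi
        omega

-- ===== VERDICT (by name: the statement is the Claim_ definition above) =====
theorem find_continuous_sequences_spec : Claim_equal_find_continuous_sequences := by
  intro arr val _
  unfold Spec_find_continuous_sequences find_continuous_sequences find_continuous_sequences_alt
  have h := fcsMain val arr 0 [] [] (Or.inl rfl)
  simp only [fcsFinish] at h
  simpa [List.length_pos_iff] using h
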